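-- pv_equiv track=rewrite | github.com/valkyriaTheBunny/variousDailyProjects | bulb.py | flipBulb
-- ===== SOURCE A (Python) =====
-- def flipBulb(bulbs: list[int]) -> int:
--     bulbs_ = bulbs.copy()
--     cost = 0
--     while 0 in bulbs_:
--         for i in range(len(bulbs)):
--             if bulbs_[i] == 1:
--                 pass
--             else:
--                 bulbs_[i] = 1
--                 cost += 1
--                 for j in range(i + 1, len(bulbs_)):
--                     bulbs_[j] = 0 if bulbs_[j] == 1 else 1
--     return cost
-- ===== SOURCE B (Python) =====
-- def flipBulb(bulbs: list[int]) -> int: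
--     if 0 not in bulbs:
--         return 0
--     cost = 0
--     parity = False  # True iff an odd number of flips have been applied so far
--     for v in bulbs:
--         if (v == 1) == parity:  # bulb is currently off under the pending flips
--             cost += 1
--             parity = not parity
--     return cost
-- ===== Notes on version B (the rewrite author's own statement) =====
-- stated objective: faster
-- what changed: Replaced the quadratic pass that physically re-flips the whole suffix after every switch with a single left-to-right scan that tracks the flip-count parity and increments the cost when the effective bulb value is off.
import Mathlib
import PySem

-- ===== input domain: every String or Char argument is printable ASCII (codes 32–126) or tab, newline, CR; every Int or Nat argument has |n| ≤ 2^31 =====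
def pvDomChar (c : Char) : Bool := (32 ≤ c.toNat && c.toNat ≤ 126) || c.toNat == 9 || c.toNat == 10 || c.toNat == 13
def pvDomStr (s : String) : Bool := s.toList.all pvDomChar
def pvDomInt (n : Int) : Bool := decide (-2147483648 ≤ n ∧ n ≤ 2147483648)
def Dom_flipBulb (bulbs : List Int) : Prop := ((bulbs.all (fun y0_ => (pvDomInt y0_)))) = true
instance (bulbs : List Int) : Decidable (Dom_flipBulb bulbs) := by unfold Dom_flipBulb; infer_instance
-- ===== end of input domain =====

-- B replaces A's pass that physically re-flips the whole suffix after each switch by a single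
-- parity-tracking scan (objective: faster).

-- ===== PORT A =====

-- 'bulbs_[j] = 0 if bulbs_[j] == 1 else 1'
def pyToggle (x : Int) : Int := if x = 1 then 0 else 1

-- inner 'for j in range(i + 1, n)' loop, as recursion on the index j
-- (n = len(bulbs_): the list length is invariant under set, so the bound is passed once)
def innerAux (n : Nat) (l : List Int) (j : Nat) : List Int :=
  if h : j < n then innerAux n (l.set j (pyToggle (l.getD j 0))) (j + 1) else l
termination_by n - j
decreasing_by exact Nat.sub_succ_lt_self _ _ h

-- outer 'for i in range(len(bulbs))' loop, state = (bulbs_, cost)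
def passAux (n : Nat) (l : List Int) (cost : Int) (i : Nat) : List Int × Int :=
  if h : i < n then
    if l.getD i 0 = 1 then passAux n l cost (i + 1)
    else passAux n (innerAux n (l.set i 1) (i + 1)) (cost + 1) (i + 1)
  else (l, cost)
termination_by n - i
decreasing_by
  · exact Nat.sub_succ_lt_self _ _ h
  · exact Nat.sub_succ_lt_self _ _ h

-- 'while 0 in bulbs_' loop; the fuel only makes the loop total (one pass already
-- leaves no zero, so the loop body runs at most once — proved below)
def whileLoop : Nat → List Int → Int → Int
  | 0, _, cost => cost
  | fuel + 1, l, cost =>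
    if (0 : Int) ∈ l then
      whileLoop fuel (passAux l.length l cost 0).1 (passAux l.length l cost 0).2
    else cost

def flipBulb (bulbs : List Int) : Int := whileLoop (bulbs.length + 1) bulbs 0

-- ===== PORT B =====

-- the 'for v in bulbs' scan of Source B, state = (parity, cost)
def altAux : List Int → Bool → Int → Int
  | [], _, cost => cost
  | v :: rest, parity, cost =>
    if decide (v = 1) = parity then altAux rest (!parity) (cost + 1)
    else altAux rest parity cost

def flipBulb_alt (bulbs : List Int) : Int :=
  if (0 : Int) ∈ bulbs then altAux bulbs false 0 else 0

-- ===== PRECONDITION & SPEC =====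
def Spec_flipBulb (bulbs : List Int) (out : Int) : Prop := out = flipBulb_alt bulbs
instance (bulbs : List Int) (out : Int) : Decidable (Spec_flipBulb bulbs out) := by unfold Spec_flipBulb; infer_instance

-- ===== CLAIM (what is proved, stated in full; the proofs are below) =====
def Claim_equal_flipBulb : Prop := ∀ (bulbs : List Int), Dom_flipBulb bulbs → Spec_flipBulb bulbs (flipBulb bulbs)

-- ===== LEMMAS AND PROOFS =====

theorem innerAux_length (n : Nat) (l : List Int) (j : Nat) :
    (innerAux n l j).length = l.length := by
  induction l, j using innerAux.induct (n := n) with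
  | case1 l j h ih => rw [innerAux, dif_pos h]; simpa using ih
  | case2 l j h => rw [innerAux, dif_neg h]

-- elementary list facts used by the pass lemmas
theorem set_take_succ (l : List Int) (j : Nat) (h : j < l.length) (t : Int) :
    (l.set j t).take (j + 1) = l.take j ++ [t] := by
  rw [List.set_eq_take_cons_drop t h, List.take_append]
  simp [List.length_take, Nat.min_eq_left (Nat.le_of_lt h)]

theorem set_drop_succ (l : List Int) (j : Nat) (h : j < l.length) (t : Int) :
    (l.set j t).drop (j + 1) = l.drop (j + 1) := by
  rw [List.set_eq_take_cons_drop t h, List.drop_append]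
  simp [List.length_take, Nat.min_eq_left (Nat.le_of_lt h)]

-- the inner loop flips every element from position j on, and leaves the prefix alone
theorem innerAux_eq (n : Nat) (l : List Int) (j : Nat) :
    l.length = n → innerAux n l j = l.take j ++ (l.drop j).map pyToggle := by
  induction l, j using innerAux.induct (n := n) with
  | case1 l j h ih =>
    intro hl
    have hj : j < l.length := hl ▸ h
    rw [innerAux, dif_pos h, ih (by simpa using hl), set_take_succ l j hj, set_drop_succ l j hj,
      List.getD_eq_getElem l 0 hj, ← List.getElem_cons_drop hj]
    simp
    rw [← List.getElem_cons_drop (show j < (List.map pyToggle l).length by simpa using hj)]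
    simp
  | case2 l j h =>
    intro hl
    rw [innerAux, dif_neg h, List.take_of_length_le (by omega),
      List.drop_of_length_le (by omega)]
    simp

-- after the pass, positions ≥ i are all ones (the prefix is untouched)
theorem passAux_take (n : Nat) (l : List Int) (cost : Int) (i : Nat) :
    l.length = n → (passAux n l cost i).1 = l.take i ++ List.replicate (n - i) 1 := by
  induction l, cost, i using passAux.induct (n := n) with
  | case1 l cost i h h1 ih =>
    intro hl
    have hi : i < l.length := hl ▸ h
    rw [passAux, dif_pos h, if_pos h1, ih hl, List.take_add_one]
    have h1' : l[i] = 1 := by rwa [List.getD_eq_getElem l 0 hi] at h1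
    have hrep : List.replicate (n - i) (1 : Int)
        = 1 :: List.replicate (n - (i + 1)) 1 := by
      rw [show n - i = (n - (i + 1)) + 1 by omega, List.replicate_succ]
    rw [hrep]
    simp [List.getElem?_eq_getElem hi, h1']
  | case2 l cost i h h1 ih =>
    intro hl
    have hi : i < l.length := hl ▸ h
    have hl' : (innerAux n (l.set i 1) (i + 1)).length = n := by
      rw [innerAux_length, List.length_set, hl]
    rw [passAux, dif_pos h, if_neg h1, ih hl',
      innerAux_eq n _ _ (by simpa using hl), set_take_succ l i hi, set_drop_succ l i hi]
    have htk : ((l.take i ++ [(1 : Int)]) ++ (l.drop (i + 1)).map pyToggle).take (i + 1)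
        = l.take i ++ [(1 : Int)] := by
      rw [List.take_append]
      simp [List.length_take, Nat.min_eq_left (Nat.le_of_lt hi),
        List.take_of_length_le (show (l.take i ++ [(1 : Int)]).length ≤ i + 1 by
          simp [List.length_take, Nat.min_eq_left (Nat.le_of_lt hi)])]
    rw [htk]
    have hrep : List.replicate (n - i) (1 : Int)
        = 1 :: List.replicate (n - (i + 1)) 1 := by
      rw [show n - i = (n - (i + 1)) + 1 by omega, List.replicate_succ]
    rw [hrep]
    simp
  | case3 l cost i h =>
    intro hl
    rw [passAux, dif_neg h]
    have hle : l.length ≤ i := by omega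
    rw [List.take_of_length_le hle, Nat.sub_eq_zero_of_le (by omega)]
    simp

-- a full pass leaves no zero: the while loop's body runs at most once
theorem passAux_all_one (l : List Int) (cost : Int) :
    (0 : Int) ∉ (passAux l.length l cost 0).1 := by
  intro hmem
  rw [passAux_take l.length l cost 0 rfl] at hmem
  simp at hmem

-- with no zero left, the loop exits (whatever fuel remains)
theorem whileLoop_exit (fuel : Nat) (l : List Int) (cost : Int) (h : (0 : Int) ∉ l) :
    whileLoop fuel l cost = cost := by
  cases fuel with
  | zero => rfl
  | succ f => rw [whileLoop, if_neg h]

-- scanning a toggled list is scanning the original with the opposite parity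
theorem altAux_map (xs : List Int) (p : Bool) (c : Int) :
    altAux (xs.map pyToggle) p c = altAux xs (!p) c := by
  induction xs generalizing p c with
  | nil => rfl
  | cons v rest ih =>
    have hdec : decide (pyToggle v = 1) = !decide (v = 1) := by
      by_cases hv : v = 1 <;> simp [pyToggle, hv]
    cases hq : decide (v = 1) <;> cases p <;> simp [altAux, hdec, hq, ih]

-- the cost of A's pass from position i equals B's parity scan of the current suffix
theorem passAux_snd (n : Nat) (l : List Int) (cost : Int) (i : Nat) :
    l.length = n → (passAux n l cost i).2 = altAux (l.drop i) false cost := by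
  induction l, cost, i using passAux.induct (n := n) with
  | case1 l cost i h h1 ih =>
    intro hl
    have hi : i < l.length := hl ▸ h
    rw [passAux, dif_pos h, if_pos h1, ih hl, ← List.getElem_cons_drop hi]
    have h1' : l[i] = 1 := by rwa [List.getD_eq_getElem l 0 hi] at h1
    simp [altAux, h1']
  | case2 l cost i h h1 ih =>
    intro hl
    have hi : i < l.length := hl ▸ h
    have hl' : (innerAux n (l.set i 1) (i + 1)).length = n := by
      rw [innerAux_length, List.length_set, hl]
    rw [passAux, dif_pos h, if_neg h1, ih hl']
    have h1' : ¬ l[i] = 1 := by rwa [List.getD_eq_getElem l 0 hi] at h1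
    have hdrop : (innerAux n (l.set i 1) (i + 1)).drop (i + 1)
        = (l.drop (i + 1)).map pyToggle := by
      rw [innerAux_eq n _ _ (by simpa using hl), set_drop_succ l i hi, List.drop_append]
      simp [List.length_take,
        List.drop_of_length_le (show ((l.set i 1).take (i + 1)).length ≤ i + 1 by
          simp [List.length_take])]
      omega
    rw [hdrop, altAux_map, ← List.getElem_cons_drop hi]
    simp [altAux, h1']
  | case3 l cost i h =>
    intro hl
    rw [passAux, dif_neg h, List.drop_of_length_le (by omega)]
    rfl

-- ===== VERDICT (by name: the statement is the Claim_ definition above) =====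
theorem flipBulb_spec : Claim_equal_flipBulb := by
  intro bulbs _
  unfold Spec_flipBulb flipBulb flipBulb_alt
  by_cases h : (0 : Int) ∈ bulbs
  · rw [whileLoop, if_pos h, whileLoop_exit _ _ _ (passAux_all_one bulbs 0), if_pos h,
      passAux_snd bulbs.length bulbs 0 0 rfl]
    simp
  · rw [whileLoop, if_neg h, if_neg h]
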